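-- pv_equiv track=rewrite | github.com/patil-ashwin/SecureAI | healthcare-chat-demo/backend.py | clean_entity_value
-- ===== SOURCE A (Python) =====
-- def clean_entity_value(value: str) -> tuple:
--     """
--     Remove common command verbs from the start of detected entity values.
--     Returns: (cleaned_value, verb_prefix)
--     """
--     common_verbs = ["show", "list", "get", "provide", "give", "display", "tell", "find", "fetch"]
--     value_lower = value.lower().strip()
--     value_stripped = value.strip()
--
--     for verb in common_verbs:
--         if value_lower.startswith(verb + " "):
--             # Remove verb and the following space
--             cleaned = value_stripped[len(verb) + 1:].strip()
--             verb_part = value_stripped[:len(verb)].strip()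
--             if cleaned:  # Only return if there's something left
--                 return cleaned, verb_part
--
--     # No verb prefix found
--     return value_stripped, ""
-- ===== SOURCE B (Python) =====
-- def clean_entity_value(value: str) -> tuple:
--     """
--     Remove common command verbs from the start of detected entity values.
--     Returns: (cleaned_value, verb_prefix)
--     """
--     verbs = {"show", "list", "get", "provide", "give", "display", "tell", "find", "fetch"}
--     stripped = value.strip()
--     parts = stripped.split(' ', 1)
--     if len(parts) == 2 and parts[0].lower() in verbs:
--         return parts[1].strip(), parts[0]
--     return stripped, ""
-- ===== Notes on version B (the rewrite author's own statement) =====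
-- stated objective: simpler
-- what changed: Replaces the 9-iteration verb loop with startswith and double slicing by a single split on the first literal space plus one set membership test of the lowered first word.
import Mathlib
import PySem

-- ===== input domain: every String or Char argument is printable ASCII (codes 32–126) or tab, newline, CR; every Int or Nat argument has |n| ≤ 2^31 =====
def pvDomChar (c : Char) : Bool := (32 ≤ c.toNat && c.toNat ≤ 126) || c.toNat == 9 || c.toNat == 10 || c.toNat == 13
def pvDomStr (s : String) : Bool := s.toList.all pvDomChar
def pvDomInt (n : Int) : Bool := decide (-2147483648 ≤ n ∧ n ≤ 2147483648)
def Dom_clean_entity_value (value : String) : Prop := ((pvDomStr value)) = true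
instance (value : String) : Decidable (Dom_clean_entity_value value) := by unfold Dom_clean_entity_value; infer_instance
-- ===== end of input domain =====

-- B replaces A's loop over nine verbs (startswith + two slices each) by a single split on
-- the first literal space and one set-membership test of the lowered first word (objective: simpler).

-- ===== PORT A =====
-- B strips the leading command verb by splitting on the first literal space instead of
-- looping over the verbs with startswith and slicing; equivalence of return values is proved below.
def pvVerbs : List String :=
  ["show", "list", "get", "provide", "give", "display", "tell", "find", "fetch"]

-- the 'for verb in common_verbs' loop of A, with the two strings computed before it
def pvLoopA (value_lower value_stripped : String) : List String → String × String
  | [] => (value_stripped, "")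
  | verb :: rest =>
    if PySem.Str.startswith value_lower (verb ++ " ") then
      let cleaned := PySem.Str.strip
        (PySem.Str.slice value_stripped (some ((PySem.Str.len verb) + 1)) none)
      let verb_part := PySem.Str.strip
        (PySem.Str.slice value_stripped none (some (PySem.Str.len verb)))
      if cleaned ≠ "" then (cleaned, verb_part)
      else pvLoopA value_lower value_stripped rest
    else pvLoopA value_lower value_stripped rest

def clean_entity_value (value : String) : String × String :=
  let value_lower := PySem.Str.strip (PySem.Str.lower value)
  let value_stripped := PySem.Str.strip value
  pvLoopA value_lower value_stripped pvVerbs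

-- ===== PORT B =====
def pvVerbSet : PySem.Set String :=
  PySem.Set.ofList ["show", "list", "get", "provide", "give", "display", "tell", "find", "fetch"]

def clean_entity_value_alt (value : String) : String × String :=
  let stripped := PySem.Str.strip value
  -- stripped.split(' ', 1): the separator " " is nonempty, so splitMax? always returns some
  match (PySem.Str.splitMax? stripped " " 1).getD [] with
  | [p0, p1] =>
    if PySem.Set.contains pvVerbSet (PySem.Str.lower p0) then (PySem.Str.strip p1, p0)
    else (stripped, "")
  | _ => (stripped, "")

-- ===== PRECONDITION & SPEC =====
def Spec_clean_entity_value (value : String) (out : String × String) : Prop := out = clean_entity_value_alt value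
instance (value : String) (out : String × String) : Decidable (Spec_clean_entity_value value out) := by unfold Spec_clean_entity_value; infer_instance

-- ===== CLAIM (what is proved, stated in full; the proofs are below) =====
def Claim_equal_clean_entity_value : Prop := ∀ (value : String), Dom_clean_entity_value value → Spec_clean_entity_value value (clean_entity_value value)

-- ===== LEMMAS AND PROOFS =====

theorem upper_toNat {c : Char} (h : PySem.Chars.isupper c = true) :
    65 ≤ c.toNat ∧ c.toNat ≤ 90 := by
  simp [PySem.Chars.isupper, Char.le_def] at h
  exact ⟨h.1, h.2⟩

theorem lowerChar_toNat {c : Char} (h : PySem.Chars.isupper c = true) :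
    (PySem.Chars.lowerChar c).toNat = c.toNat + 32 := by
  obtain ⟨h1, h2⟩ := upper_toNat h
  simp [PySem.Chars.lowerChar, h, Char.toNat_ofNat]
  omega

theorem isspace_lowerChar (c : Char) :
    PySem.Chars.isspace (PySem.Chars.lowerChar c) = PySem.Chars.isspace c := by
  by_cases h : PySem.Chars.isupper c = true
  · obtain ⟨h1, h2⟩ := upper_toNat h
    have hl := lowerChar_toNat h
    simp only [PySem.Chars.isspace, hl]
    rw [Bool.eq_iff_iff]
    simp only [Bool.or_eq_true, Bool.and_eq_true, decide_eq_true_eq]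
    omega
  · simp [PySem.Chars.lowerChar, h]

theorem lowerChar_eq_space {c : Char} : PySem.Chars.lowerChar c = ' ' ↔ c = ' ' := by
  constructor
  · intro h
    by_cases hu : PySem.Chars.isupper c = true
    · exfalso
      have := lowerChar_toNat hu
      rw [h] at this
      obtain ⟨h1, _⟩ := upper_toNat hu
      have : (' ' : Char).toNat = 32 := by decide
      omega
    · simpa [PySem.Chars.lowerChar, hu] using h
  · intro h; subst h; rfl

theorem mem_lower_space {t : List Char} : ' ' ∈ PySem.Chars.lower t ↔ ' ' ∈ t := by
  simp only [PySem.Chars.lower, List.mem_map]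
  constructor
  · rintro ⟨c, hc, he⟩
    rwa [lowerChar_eq_space.mp he] at hc
  · intro h; exact ⟨' ', h, rfl⟩

theorem lower_strip (v : List Char) :
    PySem.Chars.strip (PySem.Chars.lower v) = PySem.Chars.lower (PySem.Chars.strip v) := by
  have hps : (PySem.Chars.isspace ∘ PySem.Chars.lowerChar) = PySem.Chars.isspace := by
    funext c; exact isspace_lowerChar c
  simp only [PySem.Chars.strip, PySem.Chars.lstrip, PySem.Chars.rstrip, PySem.Chars.lower]
  rw [List.dropWhile_map, hps, ← List.map_reverse, List.dropWhile_map, hps, List.map_reverse]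

theorem mem_dropWhile_of_neg {α : Type} {p : α → Bool} {x : α} {l : List α}
    (hx : x ∈ l) (hp : p x = false) : x ∈ l.dropWhile p := by
  induction l with
  | nil => cases hx
  | cons c rest ih =>
    rw [List.dropWhile_cons]
    by_cases hc : p c = true
    · simp only [hc, if_true]
      rcases List.mem_cons.mp hx with h | h
      · subst h; rw [hc] at hp; cases hp
      · exact ih h
    · simp [Bool.not_eq_true] at hc
      simp [hc]; exact List.mem_cons.mp hx

theorem strip_ne_nil {c : Char} {l : List Char} (hc : c ∈ l)
    (hs : PySem.Chars.isspace c = false) : PySem.Chars.strip l ≠ [] := by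
  intro h
  have h1 : c ∈ PySem.Chars.lstrip l := mem_dropWhile_of_neg hc hs
  have h2 : c ∈ PySem.Chars.rstrip (PySem.Chars.lstrip l) := by
    simp only [PySem.Chars.rstrip, List.mem_reverse]
    exact mem_dropWhile_of_neg (by simpa using h1) hs
  rw [PySem.Chars.strip] at h
  rw [h] at h2
  cases h2

theorem strip_no_space {l : List Char} (h : ∀ c ∈ l, PySem.Chars.isspace c = false) :
    PySem.Chars.strip l = l := by
  have hd : ∀ (m : List Char), (∀ c ∈ m, PySem.Chars.isspace c = false) →
      m.dropWhile PySem.Chars.isspace = m := by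
    intro m hm
    cases m with
    | nil => rfl
    | cons c rest => rw [List.dropWhile_cons_of_neg (by simp [hm c (List.mem_cons_self ..)])]
  simp only [PySem.Chars.strip, PySem.Chars.lstrip, PySem.Chars.rstrip]
  rw [hd l h, hd l.reverse (by simpa using h), List.reverse_reverse]

theorem rstrip_append_spaces {x y : List Char} (h : ∀ c ∈ y, PySem.Chars.isspace c = true) :
    PySem.Chars.rstrip (x ++ y) = PySem.Chars.rstrip x := by
  simp only [PySem.Chars.rstrip, List.reverse_append]
  congr 1
  induction y using List.reverseRecOn with
  | nil => simp
  | append_singleton ys c ih =>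
    simp only [List.reverse_append, List.reverse_cons, List.reverse_nil, List.nil_append,
      List.cons_append, List.dropWhile_cons_of_pos (h c (by simp))]
    exact ih (fun d hd => h d (by simp [hd]))

theorem nospace_prefix {a b y : List Char} (ha : ' ' ∉ a) (hb : ' ' ∉ b)
    (h : (a ++ [' ']) <+: (b ++ ' ' :: y)) : a = b := by
  induction a generalizing b with
  | nil =>
    cases b with
    | nil => rfl
    | cons d b' =>
      exfalso
      obtain ⟨u, hu⟩ := h
      simp only [List.nil_append, List.cons_append] at hu
      have : d = ' ' := (List.cons_eq_cons.mp hu).1.symm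
      exact hb (this ▸ List.mem_cons_self ..)
  | cons c a' ih =>
    cases b with
    | nil =>
      exfalso
      obtain ⟨u, hu⟩ := h
      simp only [List.cons_append, List.nil_append] at hu
      have : c = ' ' := (List.cons_eq_cons.mp hu).1
      exact ha (this ▸ List.mem_cons_self ..)
    | cons d b' =>
      obtain ⟨u, hu⟩ := h
      simp only [List.cons_append] at hu
      obtain ⟨h1, h2⟩ := List.cons_eq_cons.mp hu
      have := ih (fun hx => ha (List.mem_cons_of_mem _ hx))
        (fun hx => hb (List.mem_cons_of_mem _ hx)) ⟨u, h2⟩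
      rw [h1, this]

theorem split_decomp {t : List Char} (h : ' ' ∈ t) :
    t = t.takeWhile (· ≠ ' ') ++ ' ' :: (t.dropWhile (· ≠ ' ')).tail := by
  induction t with
  | nil => cases h
  | cons c rest ih =>
    by_cases hc : c = ' '
    · subst hc; simp
    · have hr : ' ' ∈ rest := by
        rcases List.mem_cons.mp h with h' | h'
        · exact absurd h'.symm hc
        · exact h'
      have hc' : (decide ¬ (c = ' ')) = true := by simp [hc]
      rw [List.takeWhile_cons, List.dropWhile_cons]
      simp only [hc', if_true, List.cons_append]
      exact congrArg (c :: ·) (ih hr)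

theorem nospace_takeWhile (t : List Char) : ' ' ∉ t.takeWhile (· ≠ ' ') := by
  intro h
  have := List.takeWhile_subset (p := fun x => decide (x ≠ ' ')) (l := t)
  have hp := List.mem_takeWhile_imp h
  simp at hp

theorem lower_w_nospace (t : List Char) :
    ' ' ∉ PySem.Chars.lower (t.takeWhile (· ≠ ' ')) := by
  intro h
  simp only [PySem.Chars.lower, List.mem_map] at h
  obtain ⟨c, hc, he⟩ := h
  exact nospace_takeWhile t (lowerChar_eq_space.mp he ▸ hc)

theorem startswith_char {t verb : List Char} (hv : ' ' ∉ verb) :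
    (verb ++ [' ']) <+: PySem.Chars.lower t ↔
      (' ' ∈ t ∧ PySem.Chars.lower (t.takeWhile (· ≠ ' ')) = verb) := by
  constructor
  · intro h
    have hsp : ' ' ∈ t := by
      apply mem_lower_space.mp
      exact h.subset (by simp)
    refine ⟨hsp, ?_⟩
    have hdec := split_decomp hsp
    have hlt : PySem.Chars.lower t =
        PySem.Chars.lower (t.takeWhile (· ≠ ' ')) ++ ' ' ::
          PySem.Chars.lower ((t.dropWhile (· ≠ ' ')).tail) := by
      conv_lhs => rw [hdec]
      simp [PySem.Chars.lower, PySem.Chars.lowerChar, PySem.Chars.isupper]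
    rw [hlt] at h
    exact (nospace_prefix hv (lower_w_nospace t) h).symm
  · rintro ⟨hsp, hw⟩
    have hdec := split_decomp hsp
    have hlt : PySem.Chars.lower t =
        verb ++ ' ' :: PySem.Chars.lower ((t.dropWhile (· ≠ ' ')).tail) := by
      conv_lhs => rw [hdec]
      simp [PySem.Chars.lower, PySem.Chars.lowerChar, PySem.Chars.isupper, ← hw]
    rw [hlt]
    exact ⟨PySem.Chars.lower ((t.dropWhile (· ≠ ' ')).tail), by simp⟩

theorem dropWhile_idem {α : Type} (p : α → Bool) (l : List α) :
    (l.dropWhile p).dropWhile p = l.dropWhile p := by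
  induction l with
  | nil => rfl
  | cons c rest ih =>
    by_cases hc : p c = true
    · rw [List.dropWhile_cons_of_pos hc]; exact ih
    · rw [List.dropWhile_cons_of_neg (by simp_all),
          List.dropWhile_cons_of_neg (by simp_all)]

theorem rstrip_strip (u : List Char) :
    PySem.Chars.rstrip (PySem.Chars.strip u) = PySem.Chars.strip u := by
  simp only [PySem.Chars.strip, PySem.Chars.rstrip]
  rw [List.reverse_reverse, dropWhile_idem]

theorem go_zero (sep : List Char) (fuel : Nat) (l cur : List Char) (acc : List (List Char)) :
    PySem.Chars.splitOnMax.go sep fuel 0 l cur acc = ((cur.reverse ++ l) :: acc).reverse := by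
  cases fuel with
  | zero => rw [PySem.Chars.splitOnMax.go]
  | succ f => cases l with
    | nil => rw [PySem.Chars.splitOnMax.go]
             · simp
             · omega
    | cons c rest => rw [PySem.Chars.splitOnMax.go]; simp

theorem go_one (fuel : Nat) (l cur : List Char) (acc : List (List Char)) (h : l.length < fuel) :
    PySem.Chars.splitOnMax.go [' '] fuel 1 l cur acc =
      acc.reverse ++ (if ' ' ∈ l then
        [cur.reverse ++ l.takeWhile (· ≠ ' '), (l.dropWhile (· ≠ ' ')).tail]
      else [cur.reverse ++ l]) := by
  induction fuel generalizing l cur acc with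
  | zero => omega
  | succ f ih =>
    cases l with
    | nil => rw [PySem.Chars.splitOnMax.go]
             · simp
             · omega
    | cons c rest =>
      rw [PySem.Chars.splitOnMax.go]
      by_cases hc : c = ' '
      · subst hc
        simp [go_zero]
      · have : ([' '].isPrefixOf (c :: rest)) = false := by
          simp [List.isPrefixOf]; exact fun h => absurd h.symm hc
        simp only [this, if_neg (by omega : ¬ (1:Nat) = 0), Bool.false_eq_true, if_false]
        rw [ih rest (c :: cur) acc (by simpa using Nat.lt_of_succ_lt_succ h)]
        have hc' : ¬ (' ' = c) := fun e => hc e.symm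
        simp [hc', hc]

theorem pvVerbs_nodup :
    (["show", "list", "get", "provide", "give", "display", "tell", "find", "fetch"] : List String).Nodup := by
  decide

theorem pvVerbSet_eq : pvVerbSet = pvVerbs := by
  rw [pvVerbSet, pvVerbs]
  exact PySem.Set.ofList_eq_self_of_nodup _ pvVerbs_nodup

theorem verbs_nospace : ∀ v ∈ pvVerbs, ∀ c ∈ v.toList, PySem.Chars.isspace c = false := by
  intro v hv
  fin_cases hv <;> simp [PySem.Chars.isspace]

theorem nospace_of_all {l : List Char} (h : ∀ c ∈ l, PySem.Chars.isspace c = false) :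
    ' ' ∉ l := fun hsp => by have := h ' ' hsp; simp [PySem.Chars.isspace] at this

theorem splitB (st : String) :
    (PySem.Str.splitMax? st " " 1).getD [] =
      if ' ' ∈ st.toList then
        [String.ofList (st.toList.takeWhile (· ≠ ' ')),
         String.ofList ((st.toList.dropWhile (· ≠ ' ')).tail)]
      else [st] := by
  rw [PySem.Str.splitMax?]
  have hsep : (" " : String).toList = [' '] := by simp
  rw [hsep, PySem.Chars.splitMax?]
  simp only [List.isEmpty_cons, if_false, Bool.false_eq_true]
  rw [PySem.Chars.splitOnMax]
  simp only [show ¬ ((1:Int) < 0) by norm_num, if_false, Int.toNat_one]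
  rw [go_one _ _ _ _ (Nat.lt_succ_self _)]
  by_cases hsp : ' ' ∈ st.toList
  · simp [hsp]
  · simp [hsp]

theorem sw_iff (value verb : String) (hv : ' ' ∉ verb.toList) :
    PySem.Str.startswith (PySem.Str.strip (PySem.Str.lower value)) (verb ++ " ") = true ↔
      (' ' ∈ PySem.Chars.strip value.toList ∧
       PySem.Chars.lower ((PySem.Chars.strip value.toList).takeWhile (· ≠ ' ')) = verb.toList) := by
  rw [PySem.Str.startswith_eq]
  have h1 : (PySem.Str.strip (PySem.Str.lower value)).toList =
      PySem.Chars.lower (PySem.Chars.strip value.toList) := by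
    rw [PySem.Str.toList_strip, PySem.Str.toList_lower, lower_strip]
  have h2 : (verb ++ " ").toList = verb.toList ++ [' '] := by simp
  rw [h1, h2, PySem.Chars.startswith]
  rw [show (verb.toList ++ [' ']).isPrefixOf (PySem.Chars.lower (PySem.Chars.strip value.toList)) = true ↔
      (verb.toList ++ [' ']) <+: PySem.Chars.lower (PySem.Chars.strip value.toList) from
    List.isPrefixOf_iff_prefix]
  exact startswith_char hv

theorem loop_none (vl st : String) (vs : List String)
    (h : ∀ verb ∈ vs, PySem.Str.startswith vl (verb ++ " ") = false) :
    pvLoopA vl st vs = (st, "") := by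
  induction vs with
  | nil => rfl
  | cons v rest ih =>
    rw [pvLoopA]
    simp only [h v (List.mem_cons_self ..), Bool.false_eq_true, if_false]
    exact ih (fun v' hv' => h v' (List.mem_cons_of_mem _ hv'))

theorem loop_found (vl st verb : String) (vs : List String)
    (hmem : verb ∈ vs)
    (huniq : ∀ v' ∈ vs, PySem.Str.startswith vl (v' ++ " ") = true → v' = verb)
    (hsw : PySem.Str.startswith vl (verb ++ " ") = true)
    (hcl : PySem.Str.strip (PySem.Str.slice st (some ((PySem.Str.len verb) + 1)) none) ≠ "") :
    pvLoopA vl st vs =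
      (PySem.Str.strip (PySem.Str.slice st (some ((PySem.Str.len verb) + 1)) none),
       PySem.Str.strip (PySem.Str.slice st none (some (PySem.Str.len verb)))) := by
  induction vs with
  | nil => cases hmem
  | cons v rest ih =>
    by_cases hv : PySem.Str.startswith vl (v ++ " ") = true
    · have hveq : v = verb := huniq v (List.mem_cons_self ..) hv
      subst hveq
      rw [pvLoopA]
      simp only [hv, if_true, hcl, ne_eq, not_false_iff, if_true]
    · have hne : v ≠ verb := fun h => hv (h ▸ hsw)
      have hmem' : verb ∈ rest := by
        rcases List.mem_cons.mp hmem with h | h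
        · exact absurd h.symm hne
        · exact h
      rw [pvLoopA]
      simp only [hv, Bool.false_eq_true, if_false]
      exact ih hmem' (fun v' hv' => huniq v' (List.mem_cons_of_mem _ hv'))

theorem main_eq (value : String) : clean_entity_value value = clean_entity_value_alt value := by
  unfold clean_entity_value clean_entity_value_alt
  dsimp only
  rw [splitB]
  have htL : (PySem.Str.strip value).toList = PySem.Chars.strip value.toList :=
    PySem.Str.toList_strip value
  by_cases hsp : ' ' ∈ (PySem.Str.strip value).toList
  case neg =>
    simp only [hsp, if_false]
    apply loop_none
    intro verb hverb
    rw [Bool.eq_false_iff]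
    intro htrue
    have hns := verbs_nospace verb hverb
    have := (sw_iff value verb (nospace_of_all hns)).mp htrue
    rw [← htL] at this
    exact hsp this.1
  case pos =>
    simp only [hsp, if_true]
    set t := (PySem.Str.strip value).toList with ht
    set w := t.takeWhile (· ≠ ' ') with hw
    set r := (t.dropWhile (· ≠ ' ')).tail with hr
    have hdec : t = w ++ ' ' :: r := split_decomp hsp
    by_cases hm : PySem.Str.lower (String.ofList w) ∈ pvVerbSet
    case pos =>
      have hmV : PySem.Str.lower (String.ofList w) ∈ pvVerbs := by
        rw [← pvVerbSet_eq]; exact hm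
      have hcontains : PySem.Set.contains pvVerbSet (PySem.Str.lower (String.ofList w)) = true := by
        rw [pvVerbSet_eq]; simp [PySem.Set.contains, hmV]
      simp only [hcontains, if_true]
      set verb := PySem.Str.lower (String.ofList w) with hverb
      have hverbL : verb.toList = PySem.Chars.lower w := by
        rw [hverb, PySem.Str.toList_lower, String.toList_ofList]
      have hmemA : verb ∈ pvVerbs := hmV
      have hns : ∀ c ∈ verb.toList, PySem.Chars.isspace c = false := verbs_nospace verb hmemA
      have hwns : ∀ c ∈ w, PySem.Chars.isspace c = false := by
        intro c hc
        rw [← isspace_lowerChar c]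
        exact hns _ (hverbL ▸ List.mem_map_of_mem hc)
      have hswv : PySem.Str.startswith (PySem.Str.strip (PySem.Str.lower value)) (verb ++ " ") = true := by
        rw [sw_iff value verb (nospace_of_all hns)]
        rw [← htL]
        exact ⟨hsp, hverbL.symm⟩
      have hlen : PySem.Str.len verb = (w.length : Int) := by
        rw [PySem.Str.len_eq, hverbL, PySem.Chars.lower, List.length_map]
      have hslice1 : (PySem.Str.slice (PySem.Str.strip value) (some ((PySem.Str.len verb) + 1)) none).toList = r := by
        rw [PySem.Str.toList_slice, PySem.Chars.slice_eq_listSlice, hlen]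
        rw [show ((w.length : Int) + 1) = ((w.length + 1 : Nat) : Int) by push_cast; ring]
        rw [PySem.List.slice_from_natCast, ← ht, hdec]
        rw [show w ++ ' ' :: r = (w ++ [' ']) ++ r by simp]
        rw [show w.length + 1 = (w ++ [' ']).length by simp]
        exact List.drop_left
      have hslice2 : (PySem.Str.slice (PySem.Str.strip value) none (some (PySem.Str.len verb))).toList = w := by
        rw [PySem.Str.toList_slice, PySem.Chars.slice_eq_listSlice, hlen]
        rw [PySem.List.slice_to_natCast, ← ht, hdec]
        rw [show (w ++ ' ' :: r).take w.length = w from List.take_left]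
      have hrs : ∃ c ∈ r, PySem.Chars.isspace c = false := by
        by_contra hall
        push Not at hall
        have hally : ∀ c ∈ ' ' :: r, PySem.Chars.isspace c = true := by
          intro c hc
          rcases List.mem_cons.mp hc with h | h
          · subst h; rfl
          · simpa using hall c h
        have h1 : PySem.Chars.rstrip t = t := by
          rw [htL]; exact rstrip_strip _
        have h2 : PySem.Chars.rstrip t = PySem.Chars.rstrip w := by
          conv_lhs => rw [hdec]
          exact rstrip_append_spaces hally
        have h3 : (PySem.Chars.rstrip w).length ≤ w.length := by
          simp only [PySem.Chars.rstrip, List.length_reverse]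
          exact le_trans (List.length_dropWhile_le _ _) (by simp)
        have h4 : t.length = w.length + 1 + r.length := by rw [hdec]; simp; omega
        rw [h1] at h2
        have := congrArg List.length h2
        omega
      have hcl : PySem.Str.strip (PySem.Str.slice (PySem.Str.strip value) (some ((PySem.Str.len verb) + 1)) none) ≠ "" := by
        obtain ⟨c, hc, hcs⟩ := hrs
        intro hbad
        have hth : (PySem.Str.strip (PySem.Str.slice (PySem.Str.strip value) (some ((PySem.Str.len verb) + 1)) none)).toList = [] := by
          rw [hbad]; rfl
        rw [PySem.Str.toList_strip, hslice1] at hth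
        exact strip_ne_nil hc hcs hth
      have huniq : ∀ v' ∈ pvVerbs, PySem.Str.startswith (PySem.Str.strip (PySem.Str.lower value)) (v' ++ " ") = true → v' = verb := by
        intro v' hv' htrue
        have hns' := verbs_nospace v' hv'
        have hch := (sw_iff value v' (nospace_of_all hns')).mp htrue
        have hl : PySem.Chars.lower w = v'.toList := by
          rw [hw, htL]; exact hch.2
        apply String.toList_inj.mp
        rw [hverbL, hl]
      rw [loop_found _ _ verb _ hmemA huniq hswv hcl]
      apply Prod.ext
      · apply String.toList_inj.mp
        rw [PySem.Str.toList_strip, hslice1, PySem.Str.toList_strip, String.toList_ofList]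
      · apply String.toList_inj.mp
        rw [PySem.Str.toList_strip, hslice2, String.toList_ofList]
        exact strip_no_space hwns
    case neg =>
      have hmV : PySem.Str.lower (String.ofList w) ∉ pvVerbs := by
        rw [← pvVerbSet_eq]; exact hm
      have hcontains : PySem.Set.contains pvVerbSet (PySem.Str.lower (String.ofList w)) = false := by
        rw [pvVerbSet_eq]; simp [PySem.Set.contains, hmV]
      simp only [hcontains, Bool.false_eq_true, if_false]
      apply loop_none
      intro v' hv'
      rw [Bool.eq_false_iff]
      intro htrue
      have hns' := verbs_nospace v' hv'
      have hchar := (sw_iff value v' (nospace_of_all hns')).mp htrue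
      apply hm
      have hveq : PySem.Str.lower (String.ofList w) = v' := by
        apply String.toList_inj.mp
        rw [PySem.Str.toList_lower, String.toList_ofList, hw, htL]
        exact hchar.2
      rw [hveq, pvVerbSet_eq]
      exact hv'

-- ===== VERDICT (by name: the statement is the Claim_ definition above) =====
theorem clean_entity_value_spec : Claim_equal_clean_entity_value := by
  intro value _
  unfold Spec_clean_entity_value
  exact main_eq value
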